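-- pv_equiv track=rewrite | github.com/abirbhattacharya82/Secret-Code | Decoder.py | decode_sent
-- ===== SOURCE A (Python) =====
-- def decode(s):
--     t=""
--     if len(s)%2==0:
--         t=s[len(s)//2:]+s[:len(s)//2]
--     else:
--         t=s[2:len(s)-2]
--         t=t[::-1]
--     return t
--
-- def decode_sent(s):
--     t=""
--     s=s+" "
--     word=""
--     for i in s:
--         if i!=' ' and i!=',' and i!='.' and i!='!':
--             word=word+i
--         else:
--             t=t+decode(word)+i
--             word=""
--     return t
-- ===== SOURCE B (Python) =====
-- DELIMS = ' ,.!'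
--
-- def decode(s):
--     t = ""
--     if len(s) % 2 == 0:
--         t = s[len(s)//2:] + s[:len(s)//2]
--     else:
--         t = s[2:len(s)-2]
--         t = t[::-1]
--     return t
--
-- def tok(u):
--     # u is empty or ends with a delimiter: split into (word, delimiter) tokens
--     if not u:
--         return []
--     j = 0
--     while u[j] not in DELIMS:
--         j += 1
--     return [(u[:j], u[j])] + tok(u[j+1:])
--
-- def decode_sent(s):
--     return ''.join(decode(w) + d for w, d in tok(s + ' '))
-- ===== Notes on version B (the rewrite author's own statement) =====
-- stated objective: alternative
-- what changed: Replaces A's single char-by-char fold (accumulating a pending word and the output string) with a recursive tokenizer that splits the space-terminated string into (word, delimiter) pairs and then joins the decoded tokens.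
import Mathlib
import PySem

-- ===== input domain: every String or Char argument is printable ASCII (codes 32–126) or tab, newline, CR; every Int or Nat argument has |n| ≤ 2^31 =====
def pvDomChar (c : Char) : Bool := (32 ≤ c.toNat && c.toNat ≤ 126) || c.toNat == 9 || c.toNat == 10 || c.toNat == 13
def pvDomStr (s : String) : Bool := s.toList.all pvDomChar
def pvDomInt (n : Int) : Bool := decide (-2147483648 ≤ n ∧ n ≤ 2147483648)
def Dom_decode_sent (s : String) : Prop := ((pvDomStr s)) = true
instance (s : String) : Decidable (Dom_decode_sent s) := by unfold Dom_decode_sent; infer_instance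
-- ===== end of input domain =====

-- B replaces A's char-by-char accumulator loop with a recursive tokenizer (split into
-- (word, delimiter) pairs, then map-and-join); objective: alternative, same cost.

-- ===== PORT A =====
-- shared helper decode(s) (identical in Source A and Source B)
def pyDecode (s : List Char) : List Char :=
  if s.length % 2 == 0 then
    PySem.List.slice s (some (PySem.Int.floordiv s.length 2)) none ++
      PySem.List.slice s none (some (PySem.Int.floordiv s.length 2))
  else
    let t := PySem.List.slice s (some 2) (some ((s.length : Int) - 2))
    (PySem.List.slice? t none none (-1)).getD []   -- t[::-1]; step -1 ≠ 0 so getD is exact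

def stepA (acc : List Char × List Char) (i : Char) : List Char × List Char :=
  if i != ' ' && i != ',' && i != '.' && i != '!' then (acc.1, acc.2 ++ [i])
  else (acc.1 ++ pyDecode acc.2 ++ [i], [])

def decode_sent (s : String) : String :=
  String.ofList (((s.toList ++ [' ']).foldl stepA ([], [])).1)

-- ===== PORT B =====
def isDelim (c : Char) : Bool := c == ' ' || c == ',' || c == '.' || c == '!'

-- tok u: split u into (word, delimiter) tokens; the [] arm of the inner match is the
-- IndexError guard of Source B's while loop (unreachable when u is empty or ends in a delimiter)
def tok : List Char → List (List Char × Char)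
  | [] => []
  | c :: v =>
    match h : (c :: v).dropWhile (fun x => !isDelim x) with
    | [] => []
    | d :: rest => ((c :: v).takeWhile (fun x => !isDelim x), d) :: tok rest
termination_by u => u.length
decreasing_by
  have hle := List.length_dropWhile_le (fun x => !isDelim x) (c :: v)
  rw [h] at hle
  simp at hle ⊢
  omega

def decode_sent_alt (s : String) : String :=
  String.ofList (((tok (s.toList ++ [' '])).map (fun p => pyDecode p.1 ++ [p.2])).flatten)

-- ===== PRECONDITION & SPEC =====
def Spec_decode_sent (s : String) (out : String) : Prop := out = decode_sent_alt s
instance (s : String) (out : String) : Decidable (Spec_decode_sent s out) := by unfold Spec_decode_sent; infer_instance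

-- ===== CLAIM (what is proved, stated in full; the proofs are below) =====
def Claim_equal_decode_sent : Prop := ∀ (s : String), Dom_decode_sent s → Spec_decode_sent s (decode_sent s)

-- ===== LEMMAS AND PROOFS =====

-- the tail of A's fold result, as a function of the pending word and the remaining input
def J (word u : List Char) : List Char :=
  match u.dropWhile (fun x => !isDelim x) with
  | [] => []
  | d :: r =>
    pyDecode (word ++ u.takeWhile (fun x => !isDelim x)) ++
      d :: ((tok r).map (fun p => pyDecode p.1 ++ [p.2])).flatten

lemma condA (i : Char) :
    (i != ' ' && i != ',' && i != '.' && i != '!') = !isDelim i := by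
  simp [isDelim, Bool.not_or, bne, Bool.and_assoc]

lemma Jnil (v : List Char) :
    ((tok v).map (fun p => pyDecode p.1 ++ [p.2])).flatten = J [] v := by
  cases v with
  | nil => simp [tok, J]
  | cons c v' =>
    rw [tok, J]
    cases h : (c :: v').dropWhile (fun x => !isDelim x) with
    | nil => simp
    | cons d r => simp

lemma foldA_eq (u : List Char) : ∀ t word,
    (u.foldl stepA (t, word)).1 = t ++ J word u := by
  induction u with
  | nil => intro t word; simp [J]
  | cons c v ih =>
    intro t word
    rw [List.foldl_cons]
    by_cases hd : isDelim c = true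
    · have hstep : stepA (t, word) c = (t ++ pyDecode word ++ [c], []) := by
        simp [stepA, condA, hd]
      rw [hstep, ih, ← Jnil]
      have hdw : (c :: v).dropWhile (fun x => !isDelim x) = c :: v := by
        simp [hd]
      have htw : (c :: v).takeWhile (fun x => !isDelim x) = [] := by
        simp [hd]
      conv_rhs => rw [J]
      rw [hdw, htw]
      simp
    · have hstep : stepA (t, word) c = (t, word ++ [c]) := by
        simp [stepA, condA, hd]
      rw [hstep, ih]
      congr 1
      rw [J, J]
      have hdw : (c :: v).dropWhile (fun x => !isDelim x)
          = v.dropWhile (fun x => !isDelim x) := by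
        simp [hd]
      have htw : (c :: v).takeWhile (fun x => !isDelim x)
          = c :: v.takeWhile (fun x => !isDelim x) := by
        simp [hd]
      rw [hdw, htw]
      cases hv : v.dropWhile (fun x => !isDelim x) with
      | nil => rfl
      | cons d r => simp

-- ===== VERDICT (by name: the statement is the Claim_ definition above) =====
theorem decode_sent_spec : Claim_equal_decode_sent := by
  intro s _
  unfold Spec_decode_sent decode_sent decode_sent_alt
  rw [foldA_eq, Jnil]
  simp
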